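-- pv_equiv track=rewrite | github.com/cstenkamp/MastersThesisText | tex_tools/bib_add_howpublished.py | generate_parangroups
-- ===== SOURCE A (Python) =====
-- def generate_parangroups(txt):
--     #https://stackoverflow.com/a/38212061/5122790
--     stack = 0
--     startIndex = None
--     lasti = 0
--     for i, c in enumerate(txt):
--         if c == '{':
--             if stack == 0:
--                 startIndex = i + 1 # string to extract starts one index later
--                 label = (tmp := txt[lasti:i])[tmp.rfind("\n") if tmp.rfind("\n") > -1 else None:]
--             # push to stack
--             stack += 1
--         elif c == '}':
--             # pop stack
--             stack -= 1
--             if stack == 0: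
--                 yield label, txt[startIndex:i]
--                 lasti = i
-- ===== SOURCE B (Python) =====
-- def generate_parangroups(txt):
--     # Pass 1: record each top-level brace group as an index span with a depth counter.
--     spans = []
--     depth = 0
--     start = 0
--     for i, c in enumerate(txt):
--         if c == '{':
--             if depth == 0:
--                 start = i + 1
--             depth += 1
--         elif c == '}':
--             depth -= 1
--             if depth == 0:
--                 spans.append((start, i))
--     # Pass 2: walk the span list, computing each label from the previous group's end.
--     prev_end = 0
--     for s, e in spans:
--         tmp = txt[prev_end:s - 1]
--         nl = tmp.rfind("\n")
--         yield (tmp[nl:] if nl > -1 else tmp), txt[s:e]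
--         prev_end = e
-- ===== Notes on version B (the rewrite author's own statement) =====
-- stated objective: alternative
-- what changed: A is one interleaved scan that computes each label eagerly at the opening brace and yields inside the loop; B first records every top-level brace group as a (start, end) index span with a depth counter, then in a second pass over the span list computes each label from the previous span's end and yields the pairs.
import Mathlib
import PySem

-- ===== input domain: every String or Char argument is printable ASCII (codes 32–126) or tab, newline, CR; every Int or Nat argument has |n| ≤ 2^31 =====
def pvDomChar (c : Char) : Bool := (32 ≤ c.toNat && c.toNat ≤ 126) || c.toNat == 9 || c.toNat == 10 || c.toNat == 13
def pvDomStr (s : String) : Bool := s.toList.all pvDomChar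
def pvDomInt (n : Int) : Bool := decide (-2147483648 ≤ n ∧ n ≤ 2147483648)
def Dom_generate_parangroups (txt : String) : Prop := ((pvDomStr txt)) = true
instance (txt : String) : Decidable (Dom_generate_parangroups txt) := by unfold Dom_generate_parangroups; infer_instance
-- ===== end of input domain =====

-- B replaces A's single interleaved scan by two passes (span collection, then label/yield); alternative decomposition, same cost.


-- ===== PORT A =====
-- A's for-loop over enumerate(txt): structural recursion over the remaining characters,
-- carrying the current index i and the loop state (stack, startIndex, label, lasti, acc).
-- label is unbound in Python until the first top-level '{'; it is provably never read
-- before then (a yield needs stack to return to 0 from 1, which requires a prior 0→1 '{'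
-- that sets it), so it is carried as a List Char initialised to [].
def gpLoopA (cs : List Char) (rem : List Char) (i : Nat) (stack : Int) (startIndex : Nat)
    (label : List Char) (lasti : Nat) (acc : List (String × String)) : List (String × String) :=
  match rem with
  | [] => acc
  | c :: r =>
    if c = '{' then
      if stack = 0 then
        let tmp := PySem.Chars.slice cs (some (lasti : Int)) (some (i : Int))
        let nl := PySem.Chars.rfind tmp ['\n']
        let label' := if nl > -1 then PySem.Chars.slice tmp (some nl) none else tmp
        gpLoopA cs r (i+1) (stack+1) (i+1) label' lasti acc
      else gpLoopA cs r (i+1) (stack+1) startIndex label lasti acc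
    else if c = '}' then
      if stack - 1 = 0 then
        gpLoopA cs r (i+1) (stack-1) startIndex label i
          (acc ++ [(String.ofList label,
                    String.ofList (PySem.Chars.slice cs (some (startIndex : Int)) (some (i : Int))))])
      else gpLoopA cs r (i+1) (stack-1) startIndex label lasti acc
    else gpLoopA cs r (i+1) stack startIndex label lasti acc

def generate_parangroups (txt : String) : List (String × String) :=
  gpLoopA txt.toList txt.toList 0 0 0 [] 0 []

-- ===== PORT B =====
-- Pass 1: depth-counter scan recording each top-level group as an index span (start, end).
def gpSpans (rem : List Char) (i : Nat) (depth : Int) (start : Nat) : List (Nat × Nat) :=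
  match rem with
  | [] => []
  | c :: r =>
    if c = '{' then
      if depth = 0 then gpSpans r (i+1) (depth+1) (i+1)
      else gpSpans r (i+1) (depth+1) start
    else if c = '}' then
      if depth - 1 = 0 then (start, i) :: gpSpans r (i+1) (depth-1) start
      else gpSpans r (i+1) (depth-1) start
    else gpSpans r (i+1) depth start

-- Pass 2: walk the span list keeping the previous group's end, computing each label.
def gpEmit (cs : List Char) (prevEnd : Nat) : List (Nat × Nat) → List (String × String)
  | [] => []
  | (s, e) :: rest =>
    let tmp := PySem.Chars.slice cs (some (prevEnd : Int)) (some ((s - 1 : Nat) : Int))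
    let nl := PySem.Chars.rfind tmp ['\n']
    let label := if nl > -1 then PySem.Chars.slice tmp (some nl) none else tmp
    (String.ofList label, String.ofList (PySem.Chars.slice cs (some (s : Int)) (some (e : Int))))
      :: gpEmit cs e rest

def generate_parangroups_alt (txt : String) : List (String × String) :=
  gpEmit txt.toList 0 (gpSpans txt.toList 0 0 0)

-- ===== PRECONDITION & SPEC =====
def Spec_generate_parangroups (txt : String) (out : List (String × String)) : Prop := out = generate_parangroups_alt txt
instance (txt : String) (out : List (String × String)) : Decidable (Spec_generate_parangroups txt out) := by unfold Spec_generate_parangroups; infer_instance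

-- ===== CLAIM (what is proved, stated in full; the proofs are below) =====
def Claim_equal_generate_parangroups : Prop := ∀ (txt : String), Dom_generate_parangroups txt → Spec_generate_parangroups txt (generate_parangroups txt)

-- ===== LEMMAS AND PROOFS =====

-- the label A stores at a 0→1 '{': the slice cs[a:b] cut at its last newline (inclusive)
def labelOf (cs : List Char) (a b : Nat) : List Char :=
  let tmp := PySem.Chars.slice cs (some (a : Int)) (some (b : Int))
  let nl := PySem.Chars.rfind tmp ['\n']
  if nl > -1 then PySem.Chars.slice tmp (some nl) none else tmp

-- Loop invariant: whenever the stack is positive, A's stored label is the one the span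
-- (startIndex, ·) will be emitted with; then A's remaining loop produces exactly the
-- emission of the remaining spans starting from lasti.
theorem gpLoopA_eq (cs : List Char) : ∀ (rem : List Char) (i : Nat) (stack : Int)
    (startIndex : Nat) (label : List Char) (lasti : Nat) (acc : List (String × String)),
    (1 ≤ stack → label = labelOf cs lasti (startIndex - 1)) →
    gpLoopA cs rem i stack startIndex label lasti acc
      = acc ++ gpEmit cs lasti (gpSpans rem i stack startIndex) := by
  intro rem
  induction rem with
  | nil => intro i stack startIndex label lasti acc _; simp [gpLoopA, gpSpans, gpEmit]
  | cons c r ih =>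
    intro i stack startIndex label lasti acc h
    by_cases hc : c = '{'
    · by_cases hs : stack = 0
      · simp only [gpLoopA, gpSpans, if_pos hc, if_pos hs]
        exact ih (i+1) (stack+1) (i+1) _ lasti acc
          (fun _ => by simp [labelOf])
      · simp only [gpLoopA, gpSpans, if_pos hc, if_neg hs]
        exact ih (i+1) (stack+1) startIndex label lasti acc
          (fun hp => h (by omega))
    · by_cases hd : c = '}'
      · by_cases h1 : stack - 1 = 0
        · simp only [gpLoopA, gpSpans, if_neg hc, if_pos hd, if_pos h1]
          rw [ih (i+1) (stack-1) startIndex label i _ (fun hp => absurd h1 (by omega))]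
          rw [gpEmit]
          have hl : label = labelOf cs lasti (startIndex - 1) := h (by omega)
          simp [hl, labelOf, List.append_assoc]
        · simp only [gpLoopA, gpSpans, if_neg hc, if_pos hd, if_neg h1]
          exact ih (i+1) (stack-1) startIndex label lasti acc (fun hp => h (by omega))
      · simp only [gpLoopA, gpSpans, if_neg hc, if_neg hd]
        exact ih (i+1) stack startIndex label lasti acc h

-- ===== VERDICT (by name: the statement is the Claim_ definition above) =====
theorem generate_parangroups_spec : Claim_equal_generate_parangroups := by
  intro txt _
  unfold Spec_generate_parangroups generate_parangroups generate_parangroups_alt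
  rw [gpLoopA_eq txt.toList txt.toList 0 0 0 [] 0 [] (fun hp => absurd hp (by omega))]
  simp
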